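-- pv_equiv track=rewrite | github.com/cckev/cryptopals | set1/set1.py | find_repeating_blocks
-- ===== SOURCE A (Python) =====
-- def find_repeating_blocks(data, blocksize=16):
-- 	block_set = set()
-- 	res=0
-- 	for i in range(len(data)//blocksize-1):
-- 		curr = data[i*blocksize:i*blocksize+blocksize]
-- 		if curr in block_set:
-- 			res+=1
-- 		else:
-- 			block_set.add(curr)
-- 	return res
-- ===== SOURCE B (Python) =====
-- def find_repeating_blocks(data, blocksize=16):
-- 	blocks = sorted(data[i*blocksize:i*blocksize+blocksize]
-- 	                for i in range(len(data)//blocksize - 1))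
-- 	return sum(1 for prev, cur in zip(blocks, blocks[1:]) if prev == cur)
-- ===== Notes on version B (the rewrite author's own statement) =====
-- stated objective: alternative
-- what changed: Replaces the single-pass seen-set counter by sort-then-scan: sort the blocks so equal blocks become adjacent, then count adjacent equal pairs, which equals total blocks minus distinct blocks.
import Mathlib
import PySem

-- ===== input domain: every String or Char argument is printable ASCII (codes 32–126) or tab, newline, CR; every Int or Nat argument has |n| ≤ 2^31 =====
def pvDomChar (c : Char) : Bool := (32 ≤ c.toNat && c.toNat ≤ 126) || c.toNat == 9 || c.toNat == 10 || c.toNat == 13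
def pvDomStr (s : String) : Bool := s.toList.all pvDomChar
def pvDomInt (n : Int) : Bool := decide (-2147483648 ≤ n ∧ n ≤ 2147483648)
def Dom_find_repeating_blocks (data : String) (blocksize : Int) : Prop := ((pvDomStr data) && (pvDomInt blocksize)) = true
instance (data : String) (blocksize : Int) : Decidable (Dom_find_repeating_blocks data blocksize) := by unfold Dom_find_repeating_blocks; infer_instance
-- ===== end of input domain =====

-- B replaces A's single-pass seen-set counter by sort-then-scan: sort the blocks and
-- count adjacent equal pairs (objective: alternative, same result, not claimed faster).

-- ===== PORT A =====
def find_repeating_blocks (data : String) (blocksize : Int) : Int :=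
  ((PySem.List.pyRange 0 (PySem.Int.floordiv (PySem.Str.len data) blocksize - 1) 1).foldl
    (fun (st : PySem.Set String × Int) i =>
      let curr := PySem.Str.slice data (some (i * blocksize)) (some (i * blocksize + blocksize))
      if PySem.Set.contains st.1 curr then (st.1, st.2 + 1)
      else (PySem.Set.add st.1 curr, st.2))
    (PySem.Set.empty, 0)).2

-- ===== PORT B =====
def find_repeating_blocks_alt (data : String) (blocksize : Int) : Int :=
  let blocks :=
    PySem.List.sorted
      ((PySem.List.pyRange 0 (PySem.Int.floordiv (PySem.Str.len data) blocksize - 1) 1).map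
        (fun i => PySem.Str.slice data (some (i * blocksize)) (some (i * blocksize + blocksize))))
      (fun x => x) false
  (blocks.zip (PySem.List.slice blocks (some 1) none)).foldl
    (fun (acc : Int) p => if p.1 == p.2 then acc + 1 else acc) 0

-- ===== PRECONDITION & SPEC =====
-- Python raises ZeroDivisionError on len(data)//blocksize when blocksize = 0; both programs raise there.
def Pre_find_repeating_blocks (data : String) (blocksize : Int) : Prop := blocksize ≠ 0
instance (data : String) (blocksize : Int) : Decidable (Pre_find_repeating_blocks data blocksize) := by unfold Pre_find_repeating_blocks; infer_instance
def pvWitness_find_repeating_blocks : String × Int := ("abababab", 2)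
def Spec_find_repeating_blocks (data : String) (blocksize : Int) (out : Int) : Prop := out = find_repeating_blocks_alt data blocksize
instance (data : String) (blocksize : Int) (out : Int) : Decidable (Spec_find_repeating_blocks data blocksize out) := by unfold Spec_find_repeating_blocks; infer_instance

-- ===== CLAIM =====
def Claim_equal_find_repeating_blocks : Prop := ∀ (data : String) (blocksize : Int), Dom_find_repeating_blocks data blocksize → Pre_find_repeating_blocks data blocksize → Spec_find_repeating_blocks data blocksize (find_repeating_blocks data blocksize)

-- ===== LEMMAS AND PROOFS =====

-- A's seen-set loop over any list counts elements minus distinct elements.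
theorem aLoop_eq (xs : List String) (s : PySem.Set String) (r : Int) :
    (xs.foldl
      (fun (st : PySem.Set String × Int) x =>
        if PySem.Set.contains st.1 x then (st.1, st.2 + 1)
        else (PySem.Set.add st.1 x, st.2)) (s, r)).2
    = r + (xs.length : Int) - (((PySem.Set.update s xs).length : Int) - (s.length : Int)) := by
  induction xs generalizing s r with
  | nil => simp [PySem.Set.update]
  | cons x xs ih =>
    by_cases hx : x ∈ s
    · have hc : PySem.Set.contains s x = true := (PySem.Set.contains_iff s x).mpr hx
      simp only [List.foldl_cons, hc, if_pos]
      rw [ih, PySem.Set.update_cons, PySem.Set.add_of_mem hx]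
      push_cast [List.length_cons]
      ring
    · have hc : PySem.Set.contains s x = false := by
        by_contra h
        exact hx ((PySem.Set.contains_iff s x).mp (by simpa using h))
      simp only [List.foldl_cons, hc, Bool.false_eq_true, if_false]
      rw [ih, PySem.Set.update_cons, PySem.Set.add_of_not_mem hx]
      simp only [List.length_append, List.length_cons, List.length_nil]
      push_cast [List.length_cons]
      ring

-- PySem.Set.ofList xs is a permutation of Mathlib's xs.dedup.
theorem ofList_perm_dedup (xs : List String) : (PySem.Set.ofList xs).Perm xs.dedup := by
  rw [List.perm_ext_iff_of_nodup (PySem.Set.nodup_ofList xs) xs.nodup_dedup]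
  intro a
  rw [PySem.Set.mem_ofList, List.mem_dedup]

-- The fold B runs on the zipped list, from any accumulator.
theorem bFold_shift (ps : List (String × String)) (a : Int) :
    ps.foldl (fun (acc : Int) p => if p.1 == p.2 then acc + 1 else acc) a
    = a + ps.foldl (fun (acc : Int) p => if p.1 == p.2 then acc + 1 else acc) 0 := by
  induction ps generalizing a with
  | nil => simp
  | cons p ps ih =>
    simp only [List.foldl_cons]
    by_cases h : p.1 == p.2
    · rw [if_pos h, if_pos h, ih, ih (0 + 1)]; ring
    · rw [if_neg h, if_neg h, ih]

-- In a ≤-sorted list, the number of adjacent equal pairs is length minus distinct count.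
theorem adjEq_sorted (zs : List String) (hz : zs.Pairwise (· ≤ ·)) :
    (zs.zip zs.tail).foldl (fun (acc : Int) p => if p.1 == p.2 then acc + 1 else acc) 0
    = (zs.length : Int) - (zs.dedup.length : Int) := by
  induction zs with
  | nil => simp
  | cons x rest ih =>
    cases rest with
    | nil => simp [List.dedup]
    | cons y t =>
      have hp : (y :: t).Pairwise (· ≤ ·) := hz.tail
      have hxy : x ≤ y := (List.pairwise_cons.mp hz).1 y (List.mem_cons_self ..)
      have ihr := ih hp
      have hlen : (y :: t).dedup.length ≤ (y :: t).length :=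
        ((y :: t).dedup_sublist).length_le
      have ihr' : ((y :: t).zip t).foldl
          (fun (acc : Int) p => if p.1 == p.2 then acc + 1 else acc) 0
          = ((y :: t).length : Int) - ((y :: t).dedup.length : Int) := by
        simpa using ihr
      simp only [List.tail_cons, List.zip_cons_cons, List.foldl_cons]
      rw [bFold_shift, ihr']
      by_cases hxeq : x = y
      · have hmem : x ∈ y :: t := by rw [hxeq]; exact List.mem_cons_self ..
        have hb : (x == y) = true := beq_iff_eq.mpr hxeq
        rw [List.dedup_cons_of_mem hmem, hb, if_pos rfl]
        push_cast [List.length_cons]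
        ring
      · have hnmem : x ∉ y :: t := by
          intro hmem
          rcases List.mem_cons.mp hmem with h | h
          · exact hxeq h
          · have hyx : y ≤ x := (List.pairwise_cons.mp hp).1 x h
            exact hxeq (le_antisymm hxy hyx)
        have hb : (x == y) = false := beq_false_of_ne hxeq
        rw [List.dedup_cons_of_notMem hnmem, hb, if_neg (by simp)]
        push_cast [List.length_cons]
        ring

-- ===== VERDICT =====
theorem find_repeating_blocks_spec : Claim_equal_find_repeating_blocks := by
  intro data blocksize _ _
  unfold Spec_find_repeating_blocks find_repeating_blocks find_repeating_blocks_alt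
  set xs := (PySem.List.pyRange 0 (PySem.Int.floordiv (PySem.Str.len data) blocksize - 1) 1).map
      (fun i => PySem.Str.slice data (some (i * blocksize)) (some (i * blocksize + blocksize))) with hxs
  -- A side: rewrite the fold over the range as a fold over the mapped blocks
  rw [show (PySem.List.pyRange 0 (PySem.Int.floordiv (PySem.Str.len data) blocksize - 1) 1).foldl
        (fun (st : PySem.Set String × Int) i =>
          let curr := PySem.Str.slice data (some (i * blocksize)) (some (i * blocksize + blocksize))
          if PySem.Set.contains st.1 curr then (st.1, st.2 + 1)
          else (PySem.Set.add st.1 curr, st.2)) (PySem.Set.empty, 0)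
      = xs.foldl
        (fun (st : PySem.Set String × Int) x =>
          if PySem.Set.contains st.1 x then (st.1, st.2 + 1)
          else (PySem.Set.add st.1 x, st.2)) (PySem.Set.empty, 0)
      from (List.foldl_map
        (f := fun i => PySem.Str.slice data (some (i * blocksize)) (some (i * blocksize + blocksize)))
        (g := fun (st : PySem.Set String × Int) x =>
          if PySem.Set.contains st.1 x then (st.1, st.2 + 1)
          else (PySem.Set.add st.1 x, st.2))).symm]
  rw [aLoop_eq]
  -- B side
  simp only [PySem.List.slice_from_one]
  set zs := PySem.List.sorted xs (fun x => x) false with hzs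
  have hsortpw : zs.Pairwise (· ≤ ·) := by
    have := PySem.List.sorted_pairwise (xs := xs) (key := fun x => x)
    simpa using this
  rw [adjEq_sorted zs hsortpw]
  -- relate the two distinct counts and lengths through the permutation sorted xs ~ xs
  have hperm : zs.Perm xs := PySem.List.sorted_perm (xs := xs) (key := fun x => x) (rev := false)
  have hlen : zs.length = xs.length := hperm.length_eq
  have hded : zs.dedup.length = xs.dedup.length := (hperm.dedup).length_eq
  have hset : (PySem.Set.update PySem.Set.empty xs).length = xs.dedup.length := by
    have h1 : (PySem.Set.update PySem.Set.empty xs) = PySem.Set.ofList xs := rfl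
    rw [h1, (ofList_perm_dedup xs).length_eq]
  rw [hlen, hded, hset]
  simp only [PySem.Set.empty, List.length_nil]
  push_cast
  ring
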